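-- pv_equiv track=rewrite | github.com/cblazick/Modules | sequence.py | frame_list_2_string
-- ===== SOURCE A (Python) =====
-- def frame_list_2_string(inlist):
--     """
--     takes an input list of numbers
--     returns the plain text equivalent of that list
--     """
--
--     # short-circuits and input cleanup
--     if inlist == []:
--         return ""
--     else:
--         inlist.sort()
--
--     # initialize variables
--     rval = ""
--     newsequence = True
--     lastnum = None
--     series = False
--     firstdiff = None
--     thisdiff = None
--
--     # cycle through all the items in the list
--     i = -1
--     while 1:
--         i += 1
--         # break out of infinite while routine
--         if i >= len(inlist):
--             break
--
--         # if this is a new sequence add a comma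
--         if newsequence:
--             if rval != "":
--                 rval += ","
--
--             # initialize the new sequence
--             rval += str(inlist[i])
--             newsequence = False
--
--         # we are continuing an existing sequence
--         else:
--             # calculate the diff to see if we can condense this to a sequence
--             firstdiff = inlist[i] - inlist[i - 1]
--
--             if i < len(inlist) - 1:
--                 thisdiff = inlist[i + 1] - inlist[i]
--             else:
--                 thisdiff = None
--
--             if firstdiff == thisdiff:
--                 rval += "-"
--
--                 # continue scanning through the list to see how many numbers in this sequence match the current diff
--                 while 1:
--                     if i == len(inlist) - 1:
--                         break
--
--                     thisdiff = inlist[i + 1] - inlist[i]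
--                     if firstdiff == thisdiff:
--                         i += 1
--                     else:
--                         # if the diff doesn't match, this is the end of this sequence
--                         break
--
--                 if firstdiff == 1:
--                     rval += "%d" % (inlist[i])
--                 else:
--                     rval += "%dx%d" % (inlist[i], firstdiff)
--
--                 series = False
--                 newsequence = True
--
--             # if the diffs don't match, this number is on it's own
--             else:
--                 rval += ",%d" % (inlist[i])
--                 series = False
--
--     return rval
-- ===== SOURCE B (Python) =====
-- def frame_list_2_string(inlist):
--     """
--     takes an input list of numbers
--     returns the plain text equivalent of that list
--     """
--     if inlist == []:
--         return ""
--     inlist.sort()  # in place, like the original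
--
--     # pass 1: partition the sorted list into groups: (start, end, step) runs
--     # (at least 3 equally-spaced numbers) or standalone numbers
--     n = len(inlist)
--     groups = []
--     pos = 0
--     while pos < n:
--         if pos + 2 < n and inlist[pos + 1] - inlist[pos] == inlist[pos + 2] - inlist[pos + 1]:
--             step = inlist[pos + 1] - inlist[pos]
--             j = pos + 1
--             while j + 1 < n and inlist[j + 1] - inlist[j] == step:
--                 j += 1
--             groups.append((inlist[pos], inlist[j], step))
--             pos = j + 1
--         else:
--             groups.append(inlist[pos])
--             pos += 1
--
--     # pass 2: format each group and join with commas
--     tokens = []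
--     for g in groups:
--         if isinstance(g, tuple):
--             start, end, step = g
--             if step == 1:
--                 tokens.append("%d-%d" % (start, end))
--             else:
--                 tokens.append("%d-%dx%d" % (start, end, step))
--         else:
--             tokens.append("%d" % g)
--     return ",".join(tokens)
-- ===== Notes on version B (the rewrite author's own statement) =====
-- stated objective: alternative
-- what changed: A's single intertwined while-loop with newsequence/firstdiff/lookahead state is replaced by a two-pass decomposition: first partition the sorted list into run/singleton groups, then format each group and join with commas.
import Mathlib
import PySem

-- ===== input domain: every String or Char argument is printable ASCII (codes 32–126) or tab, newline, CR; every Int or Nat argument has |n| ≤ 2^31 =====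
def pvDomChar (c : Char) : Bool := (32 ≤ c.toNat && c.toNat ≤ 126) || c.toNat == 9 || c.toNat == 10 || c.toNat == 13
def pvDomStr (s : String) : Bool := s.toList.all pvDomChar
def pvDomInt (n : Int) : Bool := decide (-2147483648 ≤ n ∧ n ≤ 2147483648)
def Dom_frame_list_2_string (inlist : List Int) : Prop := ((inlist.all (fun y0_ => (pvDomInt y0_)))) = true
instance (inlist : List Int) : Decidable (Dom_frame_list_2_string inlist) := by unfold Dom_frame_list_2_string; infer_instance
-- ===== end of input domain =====

-- B replaces A's single intertwined while-loop (with newsequence/firstdiff state) by a two-pass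
-- decomposition: partition the sorted list into run/singleton groups, then format and join.
-- Both A and B sort the input list in place (observable mutation, identical in both); the
-- equivalence proved here is about the return value.

-- ===== PORT A =====
-- A's inner while-loop, scanning forward while the difference matches firstdiff.
-- Python tests `i == len(inlist) - 1`; the loop is only ever entered with i ≤ len - 1,
-- where that test coincides with `len ≤ i + 1` used here for termination.
-- All list accesses in A happen at indices that are in range, so `List.getD _ _ 0` is exact.
def aInner (l : List Int) (firstdiff : Int) (i : Nat) : Nat :=
  if l.length ≤ i + 1 then i
  else if l.getD (i + 1) 0 - l.getD i 0 = firstdiff then aInner l firstdiff (i + 1)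
  else i
termination_by l.length - i
decreasing_by omega

-- needed for the termination of aLoop (the outer loop resumes after the scanned run)
theorem aInner_ge (l : List Int) (firstdiff : Int) (i : Nat) : i ≤ aInner l firstdiff i := by
  fun_induction aInner l firstdiff i with
  | case1 => omega
  | case2 => omega
  | case3 => omega

-- A's outer while-loop; `i - 1` (Nat) is only evaluated when newseq = false, which forces 1 ≤ i.
def aLoop (l : List Int) (i : Nat) (rval : String) (newseq : Bool) : String :=
  if l.length ≤ i then rval
  else if newseq then
    aLoop l (i + 1) ((if rval ≠ "" then rval ++ "," else rval) ++ PySem.Int.toStr (l.getD i 0)) false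
  else
    let firstdiff := l.getD i 0 - l.getD (i - 1) 0
    let thisdiff : Option Int :=
      if i < l.length - 1 then some (l.getD (i + 1) 0 - l.getD i 0) else none
    if thisdiff = some firstdiff then
      let j := aInner l firstdiff i
      aLoop l (j + 1)
        (rval ++ "-" ++
          (if firstdiff = 1 then PySem.Int.toStr (l.getD j 0)
           else PySem.Int.toStr (l.getD j 0) ++ "x" ++ PySem.Int.toStr firstdiff)) true
    else
      aLoop l (i + 1) (rval ++ "," ++ PySem.Int.toStr (l.getD i 0)) false
termination_by l.length - i
decreasing_by
  · omega
  · have := aInner_ge l (l.getD i 0 - l.getD (i - 1) 0) i; omega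
  · omega

def frame_list_2_string (inlist : List Int) : String :=
  if inlist = [] then ""
  else aLoop (PySem.List.sorted inlist (fun x => x)) 0 "" true

-- ===== PORT B =====
-- B pass 1a: extend a run while the step matches.
def bExtend (l : List Int) (step : Int) (j : Nat) : Nat :=
  if j + 1 < l.length ∧ l.getD (j + 1) 0 - l.getD j 0 = step then bExtend l step (j + 1)
  else j
termination_by l.length - j
decreasing_by omega

-- needed for the termination of bGroups
theorem bExtend_ge (l : List Int) (step : Int) (j : Nat) : j ≤ bExtend l step j := by
  fun_induction bExtend l step j with
  | case1 => omega
  | case2 => omega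

-- B pass 1: partition the sorted list into groups: inr (start, end, step) runs or inl singletons.
def bGroups (l : List Int) (pos : Nat) : List (Int ⊕ Int × Int × Int) :=
  if pos < l.length then
    if pos + 2 < l.length ∧
        l.getD (pos + 1) 0 - l.getD pos 0 = l.getD (pos + 2) 0 - l.getD (pos + 1) 0 then
      let step := l.getD (pos + 1) 0 - l.getD pos 0
      let j := bExtend l step (pos + 1)
      Sum.inr (l.getD pos 0, l.getD j 0, step) :: bGroups l (j + 1)
    else Sum.inl (l.getD pos 0) :: bGroups l (pos + 1)
  else []
termination_by l.length - pos
decreasing_by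
  · have := bExtend_ge l (l.getD (pos + 1) 0 - l.getD pos 0) (pos + 1); omega
  · omega

-- B pass 2: format one group.
def bFmt : Int ⊕ Int × Int × Int → String
  | .inl x => PySem.Int.toStr x
  | .inr (s, e, d) =>
      if d = 1 then PySem.Int.toStr s ++ "-" ++ PySem.Int.toStr e
      else PySem.Int.toStr s ++ "-" ++ PySem.Int.toStr e ++ "x" ++ PySem.Int.toStr d

def frame_list_2_string_alt (inlist : List Int) : String :=
  if inlist = [] then ""
  else PySem.Str.join "," (((bGroups (PySem.List.sorted inlist (fun x => x)) 0)).map bFmt)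

-- ===== PRECONDITION & SPEC =====
def Spec_frame_list_2_string (inlist : List Int) (out : String) : Prop := out = frame_list_2_string_alt inlist
instance (inlist : List Int) (out : String) : Decidable (Spec_frame_list_2_string inlist out) := by unfold Spec_frame_list_2_string; infer_instance

-- ===== CLAIM (what is proved, stated in full; the proofs are below) =====
def Claim_equal_frame_list_2_string : Prop := ∀ (inlist : List Int), Dom_frame_list_2_string inlist → Spec_frame_list_2_string inlist (frame_list_2_string inlist)

-- ===== LEMMAS AND PROOFS =====

-- the two scans are the same function
theorem inner_eq_extend (l : List Int) (d : Int) (i : Nat) : aInner l d i = bExtend l d i := by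
  fun_induction aInner l d i with
  | case1 i h => rw [bExtend]; simp; omega
  | case2 i h hd ih => rw [bExtend, if_pos ⟨by omega, hd⟩]; exact ih
  | case3 i h hd => rw [bExtend]; simp; intro h1 h2; exact absurd h2 hd

-- ",".join(ts) written with an explicit per-element leading comma
def Ksuffix : List String → String
  | [] => ""
  | t :: ts => "," ++ t ++ Ksuffix ts

theorem join_cons (t : String) (ts : List String) :
    PySem.Str.join "," (t :: ts) = t ++ Ksuffix ts := by
  induction ts generalizing t with
  | nil =>
    apply String.toList_inj.mp
    rw [PySem.Str.toList_join]
    simp [PySem.Chars.join_singleton, Ksuffix]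
  | cons u ts ih =>
    apply String.toList_inj.mp
    have h := congrArg String.toList (ih u)
    rw [PySem.Str.toList_join] at h ⊢
    simp only [List.map_cons, PySem.Chars.join_cons_cons, Ksuffix, String.toList_append]
    simpa using h

theorem Ksuffix_cons (t : String) (ts : List String) :
    Ksuffix (t :: ts) = "," ++ PySem.Str.join "," (t :: ts) := by
  rw [join_cons, Ksuffix, String.append_assoc]

theorem dash_append_ne_empty (s t : String) : (s ++ "-") ++ t ≠ "" := by
  intro h
  have := congrArg String.toList h
  simp [String.toList_append] at this

-- B's group list is never empty below the length
theorem bGroups_ne_nil (l : List Int) (pos : Nat) (h : pos < l.length) :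
    (bGroups l pos).map bFmt ≠ [] := by
  rw [bGroups, if_pos h]
  split <;> simp

-- the main invariant, by induction on a bound k for the remaining length:
-- (1) from the state "anchor pos just printed, continuing" A produces the join of B's groups from pos;
-- (2) from the state "new sequence at pos" A produces the (comma-prefixed, if rval ≠ "") join.
theorem main_inv (l : List Int) : ∀ (k pos : Nat), l.length ≤ pos + k →
    ((pos < l.length → ∀ rval : String,
        aLoop l (pos + 1) (rval ++ PySem.Int.toStr (l.getD pos 0)) false
          = rval ++ PySem.Str.join "," ((bGroups l pos).map bFmt))
     ∧ (∀ rval : String,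
        aLoop l pos rval true
          = if rval = "" then PySem.Str.join "," ((bGroups l pos).map bFmt)
            else rval ++ Ksuffix ((bGroups l pos).map bFmt))) := by
  have base : ∀ pos, l.length ≤ pos → ∀ rval : String,
      aLoop l pos rval true
        = if rval = "" then PySem.Str.join "," ((bGroups l pos).map bFmt)
          else rval ++ Ksuffix ((bGroups l pos).map bFmt) := by
    intro pos hp rval
    have hb : bGroups l pos = [] := by rw [bGroups, if_neg (show ¬ pos < l.length by omega)]
    rw [aLoop, if_pos hp, hb]
    simp only [List.map_nil, Ksuffix]
    split_ifs with hr
    · subst hr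
      apply String.toList_inj.mp
      rw [PySem.Str.toList_join]
      simp only [List.map_nil, PySem.Chars.join]
      rfl
    · simp
  intro k
  induction k with
  | zero =>
    intro pos hk
    exact ⟨fun hpos => absurd hpos (by omega), base pos (by omega)⟩
  | succ k ih =>
    intro pos hk
    have c1 : pos < l.length → ∀ rval : String,
        aLoop l (pos + 1) (rval ++ PySem.Int.toStr (l.getD pos 0)) false
          = rval ++ PySem.Str.join "," ((bGroups l pos).map bFmt) := by
      intro hpos rval
      rw [aLoop]
      by_cases h1 : l.length ≤ pos + 1
      · -- pos is the last index: A stops; B emits the lone singleton group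
        have hg : bGroups l pos = [Sum.inl (l.getD pos 0)] := by
          rw [bGroups, if_pos hpos, if_neg (by rintro ⟨c, -⟩; omega),
              bGroups, if_neg (show ¬ pos + 1 < l.length by omega)]
        rw [if_pos h1, hg]
        simp only [List.map_cons, List.map_nil, bFmt, join_cons, Ksuffix, String.append_empty]
      · rw [if_neg h1]
        simp only [Bool.false_eq_true, if_false, Nat.add_sub_cancel]
        by_cases hcond : pos + 2 < l.length ∧
            l.getD (pos + 1) 0 - l.getD pos 0 = l.getD (pos + 2) 0 - l.getD (pos + 1) 0
        · -- a run starts at pos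
          have ht : (if pos + 1 < l.length - 1
                then some (l.getD (pos + 1 + 1) 0 - l.getD (pos + 1) 0) else none)
              = some (l.getD (pos + 1) 0 - l.getD pos 0) := by
            rw [if_pos (show pos + 1 < l.length - 1 by omega)]
            exact congrArg some hcond.2.symm
          rw [if_pos ht]
          set fd := l.getD (pos + 1) 0 - l.getD pos 0 with hfd
          set j := aInner l fd (pos + 1) with hj
          have hjge : pos + 1 ≤ j := aInner_ge l fd (pos + 1)
          have hg : bGroups l pos
              = Sum.inr (l.getD pos 0, l.getD (bExtend l fd (pos + 1)) 0, fd)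
                  :: bGroups l (bExtend l fd (pos + 1) + 1) := by
            rw [bGroups, if_pos hpos, if_pos hcond]
          rw [← inner_eq_extend, ← hj] at hg
          have hrec := (ih (j + 1) (by omega)).2
            ((rval ++ PySem.Int.toStr (l.getD pos 0)) ++ "-" ++
              (if fd = 1 then PySem.Int.toStr (l.getD j 0)
               else PySem.Int.toStr (l.getD j 0) ++ "x" ++ PySem.Int.toStr fd))
          rw [hrec, if_neg (by
            rw [show (rval ++ PySem.Int.toStr (l.getD pos 0)) ++ "-"
                  = rval ++ PySem.Int.toStr (l.getD pos 0) ++ "-" from rfl]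
            exact dash_append_ne_empty _ _)]
          rw [hg, List.map_cons, join_cons]
          by_cases h2 : fd = 1 <;> simp [bFmt, h2, String.append_assoc]
        · -- pos stands alone
          have ht : ¬ ((if pos + 1 < l.length - 1
                then some (l.getD (pos + 1 + 1) 0 - l.getD (pos + 1) 0) else none)
              = some (l.getD (pos + 1) 0 - l.getD pos 0)) := by
            split_ifs with h2
            · intro h; exact hcond ⟨by omega, (Option.some.inj h).symm⟩
            · simp
          rw [if_neg ht]
          have hg : bGroups l pos = Sum.inl (l.getD pos 0) :: bGroups l (pos + 1) := by
            rw [bGroups, if_pos hpos, if_neg hcond]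
          have hrec := (ih (pos + 1) (by omega)).1 (by omega)
            ((rval ++ PySem.Int.toStr (l.getD pos 0)) ++ ",")
          rw [show ((rval ++ PySem.Int.toStr (l.getD pos 0)) ++ ","
                  ++ PySem.Int.toStr (l.getD (pos + 1) 0))
                = ((rval ++ PySem.Int.toStr (l.getD pos 0)) ++ ",")
                  ++ PySem.Int.toStr (l.getD (pos + 1) 0) from rfl,
             hrec, hg, List.map_cons, join_cons]
          obtain ⟨t, ts, hts⟩ := List.exists_cons_of_ne_nil (bGroups_ne_nil l (pos + 1) (by omega))
          rw [hts, Ksuffix_cons, ← hts]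
          simp [bFmt, String.append_assoc]
    refine ⟨c1, fun rval => ?_⟩
    by_cases hpos : pos < l.length
    · rw [aLoop, if_neg (show ¬ l.length ≤ pos by omega),
          if_pos (show (true : Bool) = true from rfl)]
      by_cases hr : rval = ""
      · subst hr
        rw [if_neg (show ¬ ("" : String) ≠ "" by simp), c1 hpos "",
            if_pos (show ("" : String) = "" from rfl)]
        simp
      · rw [if_pos (show rval ≠ "" from hr), c1 hpos (rval ++ ","), if_neg hr]
        obtain ⟨t, ts, hts⟩ := List.exists_cons_of_ne_nil (bGroups_ne_nil l pos hpos)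
        rw [hts, Ksuffix_cons, ← hts]
        simp [String.append_assoc]
    · exact base pos (by omega) rval

-- ===== VERDICT (by name: the statement is the Claim_ definition above) =====
theorem frame_list_2_string_spec : Claim_equal_frame_list_2_string := by
  intro inlist _
  unfold Spec_frame_list_2_string frame_list_2_string frame_list_2_string_alt
  by_cases h : inlist = []
  · simp [h]
  · rw [if_neg h, if_neg h]
    set l := PySem.List.sorted inlist (fun x => x) with hl
    have := ((main_inv l l.length 0 (by omega)).2 "")
    simpa using this
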